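-- pv_equiv track=rewrite | github.com/mmacpherson/exercise-machina | watts_verify.py | find_exact_BN
-- ===== SOURCE A (Python) =====
-- def find_exact_BN(decade, data_points):
--     """Find all (B, N) pairs where (B + N*offset)//10 == watts for all data."""
--     results = []
--     for N in range(0, 500):
--         # For each N, find valid B range
--         b_lo = -(10**9)
--         b_hi = 10**9
--         for c, w in data_points:
--             offset = c - decade * 10
--             # Need: w == (B + N*offset) // 10
--             # i.e., 10*w <= B + N*offset < 10*(w+1)
--             # i.e., 10*w - N*offset <= B < 10*(w+1) - N*offset
--             lo = 10 * w - N * offset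
--             hi = 10 * (w + 1) - N * offset
--             b_lo = max(b_lo, lo)
--             b_hi = min(b_hi, hi)
--         if b_lo < b_hi:
--             for B in range(b_lo, b_hi):
--                 # Verify
--                 ok = True
--                 for c, w in data_points:
--                     offset = c - decade * 10
--                     pred = (B + N * offset) // 10
--                     if pred != w:
--                         ok = False
--                         break
--                 if ok:
--                     results.append((B, N))
--     return results
-- ===== SOURCE B (Python) =====
-- def find_exact_BN(decade, data_points):
--     """Find all (B, N) pairs where (B + N*offset)//10 == watts for all data."""
--     terms = [(c - decade * 10, 10 * w) for c, w in data_points]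
--     results = []
--     for N in range(500):
--         los = [tw - N * off for off, tw in terms]
--         lo = max(max(los), -(10 ** 9))
--         hi = min(min(los) + 10, 10 ** 9)
--         results.extend((B, N) for B in range(lo, hi))
--     return results
-- ===== Notes on version B (the rewrite author's own statement) =====
-- stated objective: simpler
-- what changed: B drops A's inner re-verification pass over all data for every candidate B (provably redundant: the intersected interval already encodes the floor-division predicate) and replaces A's hand-rolled running max/min accumulator pair with per-N comprehensions: one list of lower bounds, lo = max of it, hi = min of it + 10, then emit the range directly.
-- outside the precondition, e.g. on find_exact_BN(0, []): A does not finish within the time limit, B raises ValueError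
import Mathlib
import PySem

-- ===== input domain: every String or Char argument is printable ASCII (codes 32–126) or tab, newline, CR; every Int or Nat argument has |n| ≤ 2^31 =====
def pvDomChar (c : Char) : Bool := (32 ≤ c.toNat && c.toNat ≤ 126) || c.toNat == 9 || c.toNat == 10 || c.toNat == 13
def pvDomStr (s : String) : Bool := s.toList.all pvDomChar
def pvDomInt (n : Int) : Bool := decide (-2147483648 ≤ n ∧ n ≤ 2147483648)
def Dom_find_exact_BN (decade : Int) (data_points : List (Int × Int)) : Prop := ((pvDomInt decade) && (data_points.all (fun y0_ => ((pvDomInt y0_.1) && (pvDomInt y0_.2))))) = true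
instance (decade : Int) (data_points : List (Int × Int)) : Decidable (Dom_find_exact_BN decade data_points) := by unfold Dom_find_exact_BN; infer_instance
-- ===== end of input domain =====

-- B drops A's redundant per-candidate re-verification pass and builds each N's interval from one
-- comprehension of lower bounds (hi = min + 10), emitting the range directly (objective: simpler).


-- ===== PORT A =====
-- Python's inner verification loop with its break: stop at the first mismatching data point.
def verifyA (decade N B : Int) : List (Int × Int) → Bool
  | [] => true
  | cw :: rest =>
    if PySem.Int.floordiv (B + N * (cw.1 - decade * 10)) 10 ≠ cw.2 then false
    else verifyA decade N B rest

def find_exact_BN (decade : Int) (data_points : List (Int × Int)) : List (Int × Int) :=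
  (PySem.List.pyRange 0 500 1).foldl (fun results N =>
    let bounds := data_points.foldl
      (fun (bl : Int × Int) cw =>
        (max bl.1 (10 * cw.2 - N * (cw.1 - decade * 10)),
         min bl.2 (10 * (cw.2 + 1) - N * (cw.1 - decade * 10))))
      (-(10 ^ 9 : Int), (10 ^ 9 : Int))
    if bounds.1 < bounds.2 then
      (PySem.List.pyRange bounds.1 bounds.2 1).foldl
        (fun res B => if verifyA decade N B data_points then res ++ [(B, N)] else res)
        results
    else results) []

-- ===== PORT B =====
def find_exact_BN_alt (decade : Int) (data_points : List (Int × Int)) : List (Int × Int) :=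
  let terms := data_points.map (fun cw => (cw.1 - decade * 10, 10 * cw.2))
  (PySem.List.pyRange 0 500 1).foldl (fun results N =>
    let los := terms.map (fun t => t.2 - N * t.1)
    match PySem.List.max? los (fun x => x), PySem.List.min? los (fun x => x) with
    | some mx, some mn =>
      results ++ (PySem.List.pyRange (max mx (-(10 ^ 9))) (min (mn + 10) (10 ^ 9)) 1).map
        (fun B => (B, N))
    | _, _ => results) []

-- ===== PRECONDITION & SPEC =====
-- Pre_ excludes only the empty data list: there A enumerates 500 * 2*10^9 candidates (practically
-- divergent) while B's max() of an empty list raises ValueError.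
def Pre_find_exact_BN (decade : Int) (data_points : List (Int × Int)) : Prop := data_points ≠ []
instance (decade : Int) (data_points : List (Int × Int)) : Decidable (Pre_find_exact_BN decade data_points) := by unfold Pre_find_exact_BN; infer_instance

def pvWitness_find_exact_BN : Int × (List (Int × Int)) := (3, [(32, 7), (35, 8)])

def Spec_find_exact_BN (decade : Int) (data_points : List (Int × Int)) (out : List (Int × Int)) : Prop := out = find_exact_BN_alt decade data_points
instance (decade : Int) (data_points : List (Int × Int)) (out : List (Int × Int)) : Decidable (Spec_find_exact_BN decade data_points out) := by unfold Spec_find_exact_BN; infer_instance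

-- ===== CLAIM (what is proved, stated in full; the proofs are below) =====
def Claim_equal_find_exact_BN : Prop := ∀ (decade : Int) (data_points : List (Int × Int)), Dom_find_exact_BN decade data_points → Pre_find_exact_BN decade data_points → Spec_find_exact_BN decade data_points (find_exact_BN decade data_points)

-- ===== LEMMAS AND PROOFS =====

-- the per-point lower bound; its interval [pvLo, pvLo + 10) is exactly the floor-division predicate
def pvLo (decade N : Int) (cw : Int × Int) : Int := 10 * cw.2 - N * (cw.1 - decade * 10)

theorem foldl_max_hoist (d N : Int) (t : List (Int × Int)) :
    ∀ (a x : Int), t.foldl (fun acc cw => max acc (pvLo d N cw)) (max a x)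
      = max a (t.foldl (fun acc cw => max acc (pvLo d N cw)) x) := by
  induction t with
  | nil => intro a x; rfl
  | cons c t ih =>
    intro a x
    simp only [List.foldl_cons]
    rw [show max (max a x) (pvLo d N c) = max a (max x (pvLo d N c)) by omega, ih]

theorem foldl_min_hoist (d N : Int) (t : List (Int × Int)) :
    ∀ (a x : Int), t.foldl (fun acc cw => min acc (pvLo d N cw)) (min a x)
      = min a (t.foldl (fun acc cw => min acc (pvLo d N cw)) x) := by
  induction t with
  | nil => intro a x; rfl
  | cons c t ih =>
    intro a x
    simp only [List.foldl_cons]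
    rw [show min (min a x) (pvLo d N c) = min a (min x (pvLo d N c)) by omega, ih]

theorem foldl_min_shift (d N : Int) (t : List (Int × Int)) :
    ∀ (a : Int), t.foldl (fun acc cw => min acc (pvLo d N cw + 10)) (a + 10)
      = t.foldl (fun acc cw => min acc (pvLo d N cw)) a + 10 := by
  induction t with
  | nil => intro a; rfl
  | cons c t ih =>
    intro a
    simp only [List.foldl_cons]
    rw [show min (a + 10) (pvLo d N c + 10) = min a (pvLo d N c) + 10 by omega, ih]

theorem verifyA_true (d N B : Int) (t : List (Int × Int))
    (h : ∀ cw ∈ t, pvLo d N cw ≤ B ∧ B < pvLo d N cw + 10) :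
    verifyA d N B t = true := by
  induction t with
  | nil => rfl
  | cons c t ih =>
    obtain ⟨h1, h2⟩ := h c (by simp)
    have hfd : PySem.Int.floordiv (B + N * (c.1 - d * 10)) 10 = c.2 := by
      rw [PySem.Int.floordiv_eq_iff_of_pos (by norm_num)]
      unfold pvLo at h1 h2
      set k := N * (c.1 - d * 10) with hk
      omega
    have hne : ¬ (PySem.Int.floordiv (B + N * (c.1 - d * 10)) 10 ≠ c.2) := not_not_intro hfd
    simp only [verifyA, if_neg hne]
    exact ih (fun cw hm => h cw (by simp [hm]))

theorem foldl_verify_append (d N : Int) (dps : List (Int × Int)) (l : List Int)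
    (h : ∀ B ∈ l, verifyA d N B dps = true) :
    ∀ res, l.foldl (fun res B => if verifyA d N B dps then res ++ [(B, N)] else res) res
      = res ++ l.map (fun B => (B, N)) := by
  induction l with
  | nil => intro res; simp
  | cons x l ih =>
    intro res
    simp only [List.foldl_cons, h x (by simp), if_pos]
    rw [ih (fun B hB => h B (by simp [hB]))]
    simp

theorem step_eq (d : Int) (c : Int × Int) (t : List (Int × Int)) (N : Int)
    (results : List (Int × Int)) :
    (let bounds := (c :: t).foldl
        (fun (bl : Int × Int) cw =>
          (max bl.1 (10 * cw.2 - N * (cw.1 - d * 10)),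
           min bl.2 (10 * (cw.2 + 1) - N * (cw.1 - d * 10))))
        (-(10 ^ 9 : Int), (10 ^ 9 : Int))
      if bounds.1 < bounds.2 then
        (PySem.List.pyRange bounds.1 bounds.2 1).foldl
          (fun res B => if verifyA d N B (c :: t) then res ++ [(B, N)] else res)
          results
      else results)
    = (let los := ((c :: t).map (fun cw => (cw.1 - d * 10, 10 * cw.2))).map (fun p => p.2 - N * p.1)
       match PySem.List.max? los (fun x => x), PySem.List.min? los (fun x => x) with
       | some mx, some mn =>
         results ++ (PySem.List.pyRange (max mx (-(10 ^ 9))) (min (mn + 10) (10 ^ 9)) 1).map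
           (fun B => (B, N))
       | _, _ => results) := by
  -- name the per-point bounds
  have harg : ∀ (cw : Int × Int), 10 * (cw.2 + 1) - N * (cw.1 - d * 10) = pvLo d N cw + 10 := by
    intro cw; unfold pvLo; ring
  have hfun : (fun (bl : Int × Int) (cw : Int × Int) =>
      (max bl.1 (10 * cw.2 - N * (cw.1 - d * 10)),
       min bl.2 (10 * (cw.2 + 1) - N * (cw.1 - d * 10))))
    = (fun (bl : Int × Int) cw => (max bl.1 (pvLo d N cw), min bl.2 (pvLo d N cw + 10))) := by
    funext bl cw; rw [harg cw]; rfl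
  have hlos : ((c :: t).map (fun cw => (cw.1 - d * 10, 10 * cw.2))).map (fun p => p.2 - N * p.1)
      = pvLo d N c :: t.map (pvLo d N) := by
    simp [List.map_map, pvLo, Function.comp]
  -- B side extrema
  have hmx : PySem.List.max? (pvLo d N c :: t.map (pvLo d N)) (fun x => x)
      = some ((t.map (pvLo d N)).foldl max (pvLo d N c)) := PySem.List.max?_id_cons _ _
  have hmn : PySem.List.min? (pvLo d N c :: t.map (pvLo d N)) (fun x => x)
      = some ((t.map (pvLo d N)).foldl min (pvLo d N c)) := PySem.List.min?_id_cons _ _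
  set mx := (t.map (pvLo d N)).foldl max (pvLo d N c) with hmxdef
  set mn := (t.map (pvLo d N)).foldl min (pvLo d N c) with hmndef
  have hmx' : mx = t.foldl (fun acc cw => max acc (pvLo d N cw)) (pvLo d N c) := by
    rw [hmxdef, List.foldl_map]
  have hmn' : mn = t.foldl (fun acc cw => min acc (pvLo d N cw)) (pvLo d N c) := by
    rw [hmndef, List.foldl_map]
  -- A side pair fold splits into two folds
  rw [hfun, PySem.List.foldl_prod_mk
      (f := fun acc cw => max acc (pvLo d N cw))
      (g := fun acc cw => min acc (pvLo d N cw + 10))]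
  -- A's lower endpoint
  have hlo : (c :: t).foldl (fun acc cw => max acc (pvLo d N cw)) (-(10 ^ 9 : Int))
      = max mx (-(10 ^ 9)) := by
    simp only [List.foldl_cons]
    rw [foldl_max_hoist d N t (-(10 ^ 9)) (pvLo d N c)]
    omega
  -- A's upper endpoint
  have hhi : (c :: t).foldl (fun acc cw => min acc (pvLo d N cw + 10)) ((10 ^ 9 : Int))
      = min (mn + 10) (10 ^ 9) := by
    simp only [List.foldl_cons]
    rw [show min ((10 ^ 9 : Int)) (pvLo d N c + 10) = min ((10 ^ 9 : Int) - 10) (pvLo d N c) + 10 by omega]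
    rw [foldl_min_shift d N t, foldl_min_hoist d N t ((10 ^ 9) - 10) (pvLo d N c)]
    omega
  simp only [hlos, hmx, hmn, hlo, hhi]
  -- ranges coincide; case on emptiness
  by_cases hlt : max mx (-(10 ^ 9 : Int)) < min (mn + 10) (10 ^ 9 : Int)
  · rw [if_pos hlt]
    have hver : ∀ B ∈ PySem.List.pyRange (max mx (-(10 ^ 9 : Int))) (min (mn + 10) (10 ^ 9)) 1,
        verifyA d N B (c :: t) = true := by
      intro B hB
      rw [PySem.List.mem_pyRange_one] at hB
      apply verifyA_true
      intro cw hcw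
      have hub : pvLo d N cw ≤ mx := by
        rw [hmx']
        rcases List.mem_cons.1 hcw with h | h
        · subst h; exact (PySem.List.le_foldl_max_int t (pvLo d N) (pvLo d N cw)).1
        · exact (PySem.List.le_foldl_max_int t (pvLo d N) (pvLo d N c)).2 cw h
      have hlb : mn ≤ pvLo d N cw := by
        rw [hmndef]
        rcases List.mem_cons.1 hcw with h | h
        · subst h
          exact (PySem.List.foldl_min_le (t.map (pvLo d N)) (pvLo d N cw)).1
        · exact (PySem.List.foldl_min_le (t.map (pvLo d N)) (pvLo d N c)).2 _
            (List.mem_map_of_mem h)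
      omega
    rw [foldl_verify_append d N (c :: t) _ hver]
  · rw [if_neg hlt]
    rw [PySem.List.pyRange_one_eq_nil (by omega)]
    simp

set_option maxRecDepth 4096 in
theorem main_eq (d : Int) (dps : List (Int × Int)) (hne : dps ≠ []) :
    find_exact_BN d dps = find_exact_BN_alt d dps := by
  obtain ⟨c, t, rfl⟩ : ∃ c t, dps = c :: t := by
    cases dps with
    | nil => exact absurd rfl hne
    | cons c t => exact ⟨c, t, rfl⟩
  simp only [find_exact_BN, find_exact_BN_alt]
  apply List.foldl_ext
  intro results N _
  exact step_eq d c t N results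

-- ===== VERDICT (by name: the statement is the Claim_ definition above) =====
theorem find_exact_BN_spec : Claim_equal_find_exact_BN := by
  intro decade data_points _ hpre
  unfold Spec_find_exact_BN
  exact main_eq decade data_points hpre
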